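-- pv_equiv track=rewrite | github.com/cyberelf/googlefoobar | b2-expanding-nebula/solution.py | solution_ref
-- ===== SOURCE A (Python) =====
-- from collections import defaultdict
-- from collections import defaultdict
--
-- def generate(c1,c2,bitlen):
--     a = c1 & ~(1<<bitlen)
--     b = c2 & ~(1<<bitlen)
--     c = c1 >> 1
--     d = c2 >> 1
--     return (a&~b&~c&~d) | (~a&b&~c&~d) | (~a&~b&c&~d) | (~a&~b&~c&d)
--
-- def build_map(n, nums):
--     mapping = defaultdict(set)
--     nums = set(nums)
--     for i in range(1<<(n+1)):
--         for j in range(1<<(n+1)):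
--             generation = generate(i,j,n)
--             if generation in nums:
--                 mapping[(generation, i)].add(j)
--     return mapping
--
-- def solution_ref(g):
--     g = list(zip(*g)) # transpose
--     nrows = len(g)
--     ncols = len(g[0])
--
--     # turn map into numbers
--     nums = [sum([1<<i if col else 0 for i, col in enumerate(row)]) for row in g]
--     mapping = build_map(ncols, nums)
--
--     preimage = {i: 1 for i in range(1<<(ncols+1))}
--     for row in nums:
--         next_row = defaultdict(int)
--         for c1 in preimage:
--             for c2 in mapping[(row, c1)]:
--                 next_row[c2] += preimage[c1]
--         preimage = next_row
--     ret = sum(preimage.values())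
--
--     return ret
-- ===== SOURCE B (Python) =====
-- from collections import defaultdict
--
-- def generate(c1, c2, bitlen):
--     a = c1 & ~(1 << bitlen)
--     b = c2 & ~(1 << bitlen)
--     c = c1 >> 1
--     d = c2 >> 1
--     return (a&~b&~c&~d) | (~a&b&~c&~d) | (~a&~b&c&~d) | (~a&~b&~c&d)
--
-- def solution_ref(g):
--     g = list(zip(*g))  # transpose
--     ncols = len(g[0])
--     nums = [sum([1 << i if col else 0 for i, col in enumerate(row)]) for row in g]
--     # column DP without any precomputed transition table: re-check each pair inline
--     preimage = {i: 1 for i in range(1 << (ncols + 1))}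
--     for row in nums:
--         next_row = defaultdict(int)
--         for c1 in preimage:
--             v = preimage[c1]
--             for c2 in range(1 << (ncols + 1)):
--                 if generate(c1, c2, ncols) == row:
--                     next_row[c2] += v
--         preimage = next_row
--     return sum(preimage.values())
-- ===== Notes on version B (the rewrite author's own statement) =====
-- stated objective: simpler
-- what changed: B deletes build_map and the precomputed (generation,c1)->set(c2) transition table entirely: the column DP checks generate(c1,c2,ncols)==row inline for every candidate c2 while processing each row, so no table, no nums set-membership filter and no defaultdict(set) exist in B.
import Mathlib
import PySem

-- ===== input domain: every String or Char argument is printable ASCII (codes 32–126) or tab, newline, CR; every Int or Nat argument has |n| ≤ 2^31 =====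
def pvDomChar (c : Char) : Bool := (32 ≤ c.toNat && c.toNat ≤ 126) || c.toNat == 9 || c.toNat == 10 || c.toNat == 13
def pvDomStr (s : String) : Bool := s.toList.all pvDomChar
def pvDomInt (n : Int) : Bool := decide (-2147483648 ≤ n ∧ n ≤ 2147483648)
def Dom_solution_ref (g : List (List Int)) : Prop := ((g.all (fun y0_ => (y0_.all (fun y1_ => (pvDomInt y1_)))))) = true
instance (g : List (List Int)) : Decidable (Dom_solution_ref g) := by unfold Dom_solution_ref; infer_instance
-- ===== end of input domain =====

-- B drops A's precomputed transition table and re-checks generate(c1,c2,ncols)==row inline in the DP;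
-- equivalence is about the return value only (A also mutates nothing observable in its argument).

-- ===== PORT A =====
-- generate(c1, c2, bitlen)  (shared rule: identical source in Source A and Source B)
def pvGenerate (c1 c2 bitlen : Int) : Int :=
  let a := PySem.Int.band c1 (Int.not ((1:Int) <<< bitlen.toNat))
  let b := PySem.Int.band c2 (Int.not ((1:Int) <<< bitlen.toNat))
  let c := c1 >>> (1:Nat)
  let d := c2 >>> (1:Nat)
  PySem.Int.bor (PySem.Int.bor (PySem.Int.bor
    (PySem.Int.band (PySem.Int.band (PySem.Int.band a (Int.not b)) (Int.not c)) (Int.not d))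
    (PySem.Int.band (PySem.Int.band (PySem.Int.band (Int.not a) b) (Int.not c)) (Int.not d)))
    (PySem.Int.band (PySem.Int.band (PySem.Int.band (Int.not a) (Int.not b)) c) (Int.not d)))
    (PySem.Int.band (PySem.Int.band (PySem.Int.band (Int.not a) (Int.not b)) (Int.not c)) d)

-- list(zip(*g)) : tuples of the i-th entries, truncated at the shortest row (zip() with no args = [])
def pvZipStar (g : List (List Int)) : List (List Int) :=
  match g with
  | [] => []
  | r :: rest =>
    let m := rest.foldl (fun m row => min m row.length) r.length
    (List.range m).map (fun i => (r :: rest).map (fun row => row.getD i 0))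

-- sum([1<<i if col else 0 for i, col in enumerate(row)])
def pvRowNum (row : List Int) : Int :=
  ((PySem.List.enumerate row).map (fun (p : Int × Int) => if p.2 ≠ 0 then (1:Int) <<< p.1.toNat else (0:Int))).sum

-- build_map(n, nums)
def pvBuildMap (n : Int) (nums : List Int) : PySem.Dict (Int × Int) (PySem.Set Int) :=
  let numsSet := PySem.Set.ofList nums
  (PySem.List.pyRange 0 ((1:Int) <<< (n+1).toNat) 1).foldl (fun m i =>
    (PySem.List.pyRange 0 ((1:Int) <<< (n+1).toNat) 1).foldl (fun m j =>
      let gen := pvGenerate i j n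
      if numsSet.contains gen then m.modify (gen, i) PySem.Set.empty (fun s => s.add j) else m) m)
    PySem.Dict.empty

-- the body of A's "for row in nums" loop
def pvStepA (mapping : PySem.Dict (Int × Int) (PySem.Set Int))
    (pre : PySem.Dict Int Int) (row : Int) : PySem.Dict Int Int :=
  pre.keys.foldl (fun nr c1 =>
    (mapping.getD (row, c1) PySem.Set.empty).foldl
      (fun nr c2 => nr.insert c2 (nr.getD c2 0 + pre.getD c1 0)) nr)
    PySem.Dict.empty

def solution_ref (g : List (List Int)) : Int :=
  let gt := pvZipStar g
  let _nrows := gt.length                    -- computed by A, never used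
  let ncols : Int := (gt.headD []).length    -- len(g[0]): the headD default is only reached outside Pre_
  let nums := gt.map pvRowNum
  let mapping := pvBuildMap ncols nums
  let pre0 : PySem.Dict Int Int :=
    (PySem.List.pyRange 0 ((1:Int) <<< (ncols+1).toNat) 1).foldl (fun d i => d.insert i 1) PySem.Dict.empty
  let preFinal := nums.foldl (pvStepA mapping) pre0
  preFinal.values.sum

-- ===== PORT B =====
-- the body of B's "for row in nums" loop: inline transition check, no table
def pvStepB (ncols : Int) (pre : PySem.Dict Int Int) (row : Int) : PySem.Dict Int Int :=
  pre.keys.foldl (fun nr c1 =>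
    let v := pre.getD c1 0
    (PySem.List.pyRange 0 ((1:Int) <<< (ncols+1).toNat) 1).foldl
      (fun nr c2 => if pvGenerate c1 c2 ncols == row then nr.insert c2 (nr.getD c2 0 + v) else nr) nr)
    PySem.Dict.empty

def solution_ref_alt (g : List (List Int)) : Int :=
  let gt := pvZipStar g
  let ncols : Int := (gt.headD []).length
  let nums := gt.map pvRowNum
  let pre0 : PySem.Dict Int Int :=
    (PySem.List.pyRange 0 ((1:Int) <<< (ncols+1).toNat) 1).foldl (fun d i => d.insert i 1) PySem.Dict.empty
  let preFinal := nums.foldl (pvStepB ncols) pre0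
  preFinal.values.sum

-- ===== PRECONDITION & SPEC =====
-- Pre_ excludes exactly the inputs where Python A raises IndexError at g[0] after the transpose:
-- g empty or containing an empty row (then zip(*g) is empty).
def Pre_solution_ref (g : List (List Int)) : Prop := g ≠ [] ∧ ∀ r ∈ g, r ≠ []
instance (g : List (List Int)) : Decidable (Pre_solution_ref g) := by unfold Pre_solution_ref; infer_instance
def pvWitness_solution_ref : List (List Int) := [[1]]

def Spec_solution_ref (g : List (List Int)) (out : Int) : Prop := out = solution_ref_alt g
instance (g : List (List Int)) (out : Int) : Decidable (Spec_solution_ref g out) := by unfold Spec_solution_ref; infer_instance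

-- ===== CLAIM (what is proved, stated in full; the proofs are below) =====
def Claim_equal_solution_ref : Prop := ∀ (g : List (List Int)), Dom_solution_ref g → Pre_solution_ref g → Spec_solution_ref g (solution_ref g)

-- ===== LEMMAS AND PROOFS =====

-- the inner loop of build_map never touches key (row, c1) while the outer index i ≠ c1
theorem pv_inner_ne (n row c1 i : Int) (nums : List Int) (hi : i ≠ c1) :
    ∀ (js : List Int) (m : PySem.Dict (Int × Int) (PySem.Set Int)),
      ((js.foldl (fun m j =>
          let gen := pvGenerate i j n
          if (PySem.Set.ofList nums).contains gen then m.modify (gen, i) PySem.Set.empty (fun s => PySem.Set.add s j) else m) m)).getD (row, c1) PySem.Set.empty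
        = m.getD (row, c1) PySem.Set.empty := by
  intro js
  induction js with
  | nil => intro m; rfl
  | cons j js ih =>
    intro m
    simp only [List.foldl_cons]
    rw [ih]
    split
    · rw [PySem.Dict.getD_modify_of_ne]
      intro h
      exact hi (by injection h with h1 h2; exact h2.symm)
    · rfl

-- the inner loop of build_map at outer index i = c1: key (row, c1) collects exactly the j with generate(c1,j,n) = row
theorem pv_inner_eq (n row c1 : Int) (nums : List Int) (hrow : row ∈ nums) :
    ∀ (js : List Int) (m : PySem.Dict (Int × Int) (PySem.Set Int)),
      ((js.foldl (fun m j =>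
          let gen := pvGenerate c1 j n
          if (PySem.Set.ofList nums).contains gen then m.modify (gen, c1) PySem.Set.empty (fun s => PySem.Set.add s j) else m) m)).getD (row, c1) PySem.Set.empty
        = (js.filter (fun j => pvGenerate c1 j n == row)).foldl PySem.Set.add (m.getD (row, c1) PySem.Set.empty) := by
  intro js
  induction js with
  | nil => intro m; rfl
  | cons j js ih =>
    intro m
    simp only [List.foldl_cons, List.filter_cons]
    by_cases hg : pvGenerate c1 j n = row
    · have hc : (PySem.Set.ofList nums).contains row = true := by
        simp [PySem.Set.contains, PySem.Set.mem_ofList, hrow]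
      simp only [hg, hc, beq_self_eq_true, if_true, List.foldl_cons]
      rw [ih]
      simp [PySem.Dict.getD_modify_self]
    · have hb : (pvGenerate c1 j n == row) = false := by simp [hg]
      simp only [hb, Bool.false_eq_true, if_false]
      by_cases hc : (PySem.Set.ofList nums).contains (pvGenerate c1 j n) = true
      · simp only [hc, if_true]
        rw [ih, PySem.Dict.getD_modify_of_ne]
        intro h
        exact hg (by injection h with h1 h2; exact h1.symm)
      · simp only [Bool.not_eq_true] at hc
        simp only [hc, Bool.false_eq_true, if_false]
        exact ih m

-- the outer loop of build_map over indices all ≠ c1 does not change key (row, c1)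
theorem pv_outer_ne (n row c1 : Int) (nums js : List Int) :
    ∀ (is : List Int) (m : PySem.Dict (Int × Int) (PySem.Set Int)), (∀ i ∈ is, i ≠ c1) →
      ((is.foldl (fun m i =>
          js.foldl (fun m j =>
            let gen := pvGenerate i j n
            if (PySem.Set.ofList nums).contains gen then m.modify (gen, i) PySem.Set.empty (fun s => PySem.Set.add s j) else m) m) m)).getD (row, c1) PySem.Set.empty
        = m.getD (row, c1) PySem.Set.empty := by
  intro is
  induction is with
  | nil => intro m _; rfl
  | cons i is ih =>
    intro m h
    simp only [List.foldl_cons]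
    rw [ih _ (fun x hx => h x (List.mem_cons_of_mem _ hx)),
        pv_inner_ne n row c1 i nums (h i (List.mem_cons_self ..)) js]

-- accumulating distinct fresh elements into a set appends them
theorem pv_foldl_add (l : List Int) : ∀ (s : List Int), (s ++ l).Nodup → l.foldl PySem.Set.add s = s ++ l := by
  induction l with
  | nil => intro s _; simp
  | cons x l ih =>
    intro s h
    rw [List.append_cons] at h
    have hx : x ∉ s := by
      have := h.sublist (List.sublist_append_left _ _)
      simp only [List.nodup_append] at this
      intro hxs
      exact this.2.2 x hxs x (List.mem_singleton.2 rfl) rfl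
    simp only [List.foldl_cons, PySem.Set.add_of_not_mem hx]
    simpa using ih (s ++ [x]) h

-- build_map's entry at (row, c1): exactly the j in range with generate(c1, j, n) = row, in ascending order
theorem pv_mapVal (n row c1 : Int) (nums : List Int) (hrow : row ∈ nums)
    (h0 : 0 ≤ c1) (hN : c1 < (1:Int) <<< (n+1).toNat) :
    (pvBuildMap n nums).getD (row, c1) PySem.Set.empty
      = (PySem.List.pyRange 0 ((1:Int) <<< (n+1).toNat) 1).filter (fun j => pvGenerate c1 j n == row) := by
  have hmem : c1 ∈ PySem.List.pyRange 0 ((1:Int) <<< (n+1).toNat) 1 := PySem.List.mem_pyRange_one.2 ⟨h0, hN⟩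
  have hnd : (PySem.List.pyRange 0 ((1:Int) <<< (n+1).toNat) 1).Nodup := PySem.List.nodup_pyRange_one ..
  obtain ⟨l1, l2, hsplit⟩ := List.append_of_mem hmem
  have hnd2 := hsplit ▸ hnd
  simp only [List.nodup_append, List.nodup_cons] at hnd2
  have hl1 : ∀ i ∈ l1, i ≠ c1 := fun i hi => hnd2.2.2 i hi c1 (List.mem_cons_self ..)
  have hl2 : ∀ i ∈ l2, i ≠ c1 := fun i hi he => hnd2.2.1.1 (he ▸ hi)
  unfold pvBuildMap
  rw [hsplit]
  rw [List.foldl_append, List.foldl_cons]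
  rw [pv_outer_ne n row c1 nums (l1 ++ c1 :: l2) l2 _ hl2]
  rw [pv_inner_eq n row c1 nums hrow]
  rw [pv_outer_ne n row c1 nums (l1 ++ c1 :: l2) l1 _ hl1]
  have hempty : (PySem.Dict.empty : PySem.Dict (Int × Int) (PySem.Set Int)).getD (row, c1) PySem.Set.empty = PySem.Set.empty := rfl
  rw [hempty]
  have hfn : (List.filter (fun j => pvGenerate c1 j n == row) (l1 ++ c1 :: l2)).Nodup :=
    (hsplit ▸ hnd).filter _
  rw [List.filter_append] at hfn
  exact pv_foldl_add _ [] (by simpa using hfn)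

-- with the table entry known, A's per-row step is B's per-row step
theorem pv_step_eq (ncols : Int) (nums : List Int) (pre : PySem.Dict Int Int) (row : Int)
    (hrow : row ∈ nums) (hk : ∀ k ∈ pre.keys, 0 ≤ k ∧ k < (1:Int) <<< (ncols+1).toNat) :
    pvStepA (pvBuildMap ncols nums) pre row = pvStepB ncols pre row := by
  unfold pvStepA pvStepB
  refine PySem.List.foldl_congr_mem' pre.keys _ _ _ (fun c1 hc1 nr => ?_)
  obtain ⟨h0, hN⟩ := hk c1 hc1
  rw [pv_mapVal ncols row c1 nums hrow h0 hN, List.foldl_filter]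

-- B's per-row step only produces keys inside the state range
theorem pv_stepB_keys (ncols : Int) (pre : PySem.Dict Int Int) (row : Int) :
    ∀ k ∈ (pvStepB ncols pre row).keys, 0 ≤ k ∧ k < (1:Int) <<< (ncols+1).toNat := by
  unfold pvStepB
  have main : ∀ (l : List Int) (nr : PySem.Dict Int Int),
      (∀ k ∈ nr.keys, 0 ≤ k ∧ k < (1:Int) <<< (ncols+1).toNat) →
      ∀ k ∈ (l.foldl (fun nr c1 =>
          (PySem.List.pyRange 0 ((1:Int) <<< (ncols+1).toNat) 1).foldl
            (fun nr c2 => if pvGenerate c1 c2 ncols == row then nr.insert c2 (nr.getD c2 0 + pre.getD c1 0) else nr) nr) nr).keys,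
        0 ≤ k ∧ k < (1:Int) <<< (ncols+1).toNat := by
    intro l
    induction l with
    | nil => intro nr h; exact h
    | cons c1 l ih =>
      intro nr h
      simp only [List.foldl_cons]
      refine ih _ (fun k hk => ?_)
      rw [← List.foldl_filter] at hk
      rw [PySem.Dict.keys_foldl_insert] at hk
      rcases (PySem.Set.mem_update _ _ _).1 hk with hold | hnew
      · exact h k hold
      · exact PySem.List.mem_pyRange_one.1 (List.mem_of_mem_filter hnew)
  exact main pre.keys PySem.Dict.empty (by intro k hk; simp at hk)

-- the whole DP agrees row by row
theorem pv_fold_eq (ncols : Int) (nums : List Int) :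
    ∀ (rows : List Int) (pre : PySem.Dict Int Int), (∀ r ∈ rows, r ∈ nums) →
      (∀ k ∈ pre.keys, 0 ≤ k ∧ k < (1:Int) <<< (ncols+1).toNat) →
      rows.foldl (pvStepA (pvBuildMap ncols nums)) pre = rows.foldl (pvStepB ncols) pre := by
  intro rows
  induction rows with
  | nil => intro pre _ _; rfl
  | cons row rows ih =>
    intro pre hr hk
    simp only [List.foldl_cons]
    rw [pv_step_eq ncols nums pre row (hr row (List.mem_cons_self ..)) hk]
    exact ih _ (fun r h => hr r (List.mem_cons_of_mem _ h)) (pv_stepB_keys ncols pre row)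

-- the initial DP state {i: 1} has keys inside the state range
theorem pv_pre0_keys (ncols : Int) :
    ∀ k ∈ ((PySem.List.pyRange 0 ((1:Int) <<< (ncols+1).toNat) 1).foldl
        (fun d i => d.insert i 1) (PySem.Dict.empty : PySem.Dict Int Int)).keys,
      0 ≤ k ∧ k < (1:Int) <<< (ncols+1).toNat := by
  intro k hk
  rw [PySem.Dict.keys_foldl_insert] at hk
  rcases (PySem.Set.mem_update _ _ _).1 hk with hold | hnew
  · simp at hold
  · exact PySem.List.mem_pyRange_one.1 hnew

-- ===== VERDICT (by name: the statement is the Claim_ definition above) =====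
theorem solution_ref_spec : Claim_equal_solution_ref := by
  intro g _ _
  unfold Spec_solution_ref solution_ref solution_ref_alt
  dsimp only
  rw [pv_fold_eq _ _ _ _ (fun r h => h) (pv_pre0_keys _)]
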